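-- pv_equiv track=rewrite | github.com/bhavinisai/listening-between-the-lines | src/labeled_transcript_v3.py | detect_host_segments
-- ===== SOURCE A (Python) =====
-- HOST_PHRASES = [
--     # Welcoming
--     "welcome to", "welcome back", "welcome back to",
--     "thanks for joining", "glad you could join", "great to have you",
--     "thank you for being here", "thank you so much for being here",
--     "thanks for coming on", "thanks for being on the show",
--
--     # Opening
--     "today we have", "today i'm joined by", "today i'm talking to",
--     "my guest today", "i'm here with", "joining me today",
--
--     # Closing
--     "thanks for listening", "thank you for listening",
--     "hope you enjoyed", "hope you had fun", "hope you learned",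
--     "that's all for today", "that's it for today",
--     "see you next time", "until next time", "catch you next time",
--     "don't forget to subscribe", "make sure to subscribe",
--
--     # Transition/Control
--     "let's dive in", "let's get into it", "let's talk about",
--     "i want to ask you", "i wanted to ask", "can i ask you",
-- ]
--
-- YOUTUBE_HOST_KEYWORDS = [
--     "hit the subscribe button", "subscribe to the channel",
--     "subscribe to my channel", "don't forget to subscribe",
--     "like and subscribe", "subscribe below", "click subscribe",
--     "smash that subscribe", "hit the bell", "notification bell",
--     "leave a like", "hit the like button",
--     "check out the description", "link in the description",
--     "support the channel", "support the show",
--     "patreon",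
-- ]
--
-- SPONSOR_KEYWORDS = [
--     "sponsor", "brought to you by", "today's sponsor",
--     "this episode is sponsored", "this podcast is brought",
--     "promo code", "discount code", "coupon code",
--     "percent off", "% off", "discount",
--     "audible", "squarespace", "hellofresh", "betterhelp",
--     "nordvpn", "athletic greens",
--     "before we get started", "before we dive in",
--     "quick word from our sponsor", "message from our sponsor",
-- ]
--
-- def contains_keywords(text, keywords):
--     """Check if text contains any of the keywords (case-insensitive)."""
--     text_lower = text.lower()
--     return any(keyword.lower() in text_lower for keyword in keywords)
--
-- def detect_host_segments(segments):
--     """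
--     Detect segments that indicate who the host is.
--     Returns (indices, detection_type)
--     Priority: Host Phrases > YouTube CTAs > Sponsor
--     """
--     host_phrase_segs = []
--     youtube_segs = []
--     sponsor_segs = []
--
--     for i, seg in enumerate(segments):
--         text = seg.get('text', '')
--
--         if contains_keywords(text, HOST_PHRASES):
--             host_phrase_segs.append(i)
--         elif contains_keywords(text, YOUTUBE_HOST_KEYWORDS):
--             youtube_segs.append(i)
--         elif contains_keywords(text, SPONSOR_KEYWORDS):
--             sponsor_segs.append(i)
--
--     if host_phrase_segs:
--         return host_phrase_segs, "host_phrases"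
--     elif youtube_segs:
--         return youtube_segs, "youtube_cta"
--     elif sponsor_segs:
--         return sponsor_segs, "sponsor"
--
--     return [], "none"
-- ===== SOURCE B (Python) =====
-- HOST_PHRASES = [
--     "welcome to", "welcome back", "welcome back to",
--     "thanks for joining", "glad you could join", "great to have you",
--     "thank you for being here", "thank you so much for being here",
--     "thanks for coming on", "thanks for being on the show",
--     "today we have", "today i'm joined by", "today i'm talking to",
--     "my guest today", "i'm here with", "joining me today",
--     "thanks for listening", "thank you for listening",
--     "hope you enjoyed", "hope you had fun", "hope you learned",
--     "that's all for today", "that's it for today",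
--     "see you next time", "until next time", "catch you next time",
--     "don't forget to subscribe", "make sure to subscribe",
--     "let's dive in", "let's get into it", "let's talk about",
--     "i want to ask you", "i wanted to ask", "can i ask you",
-- ]
--
-- YOUTUBE_HOST_KEYWORDS = [
--     "hit the subscribe button", "subscribe to the channel",
--     "subscribe to my channel", "don't forget to subscribe",
--     "like and subscribe", "subscribe below", "click subscribe",
--     "smash that subscribe", "hit the bell", "notification bell",
--     "leave a like", "hit the like button",
--     "check out the description", "link in the description",
--     "support the channel", "support the show",
--     "patreon",
-- ]
--
-- SPONSOR_KEYWORDS = [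
--     "sponsor", "brought to you by", "today's sponsor",
--     "this episode is sponsored", "this podcast is brought",
--     "promo code", "discount code", "coupon code",
--     "percent off", "% off", "discount",
--     "audible", "squarespace", "hellofresh", "betterhelp",
--     "nordvpn", "athletic greens",
--     "before we get started", "before we dive in",
--     "quick word from our sponsor", "message from our sponsor",
-- ]
--
-- def contains_keywords(text, keywords):
--     """Check if text contains any of the keywords (case-insensitive)."""
--     text_lower = text.lower()
--     return any(keyword.lower() in text_lower for keyword in keywords)
--
-- PRIORITY_TABLE = [
--     (HOST_PHRASES, "host_phrases"),
--     (YOUTUBE_HOST_KEYWORDS, "youtube_cta"),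
--     (SPONSOR_KEYWORDS, "sponsor"),
-- ]
--
-- def detect_host_segments(segments):
--     """Priority-ordered table scan: first category with any match wins."""
--     for keywords, label in PRIORITY_TABLE:
--         hits = [i for i, seg in enumerate(segments)
--                 if contains_keywords(seg.get('text', ''), keywords)]
--         if hits:
--             return hits, label
--     return [], "none"
-- ===== Notes on version B (the rewrite author's own statement) =====
-- stated objective: simpler
-- what changed: Replaces the single pass with three elif accumulators by a priority-ordered (keywords, label) table scanned category by category, returning the first category with any matching segment index.
import Mathlib
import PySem

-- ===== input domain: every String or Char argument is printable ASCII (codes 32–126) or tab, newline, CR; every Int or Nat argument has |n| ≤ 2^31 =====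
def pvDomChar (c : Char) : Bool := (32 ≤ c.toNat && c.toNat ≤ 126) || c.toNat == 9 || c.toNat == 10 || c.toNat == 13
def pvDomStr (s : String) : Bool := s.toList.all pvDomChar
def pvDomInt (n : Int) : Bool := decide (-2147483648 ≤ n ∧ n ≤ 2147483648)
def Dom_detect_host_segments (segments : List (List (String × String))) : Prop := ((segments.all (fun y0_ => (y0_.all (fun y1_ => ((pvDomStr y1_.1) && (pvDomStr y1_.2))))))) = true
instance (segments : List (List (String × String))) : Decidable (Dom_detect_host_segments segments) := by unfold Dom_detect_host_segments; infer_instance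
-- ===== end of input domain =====

-- B replaces A's single pass with three elif accumulators by a priority-ordered
-- (keywords, label) table scanned category by category (first non-empty hit list wins); objective: simpler.


-- ===== PORT A =====
def HOST_PHRASES : List String := ["welcome to", "welcome back", "welcome back to", "thanks for joining", "glad you could join", "great to have you", "thank you for being here", "thank you so much for being here", "thanks for coming on", "thanks for being on the show", "today we have", "today i'm joined by", "today i'm talking to", "my guest today", "i'm here with", "joining me today", "thanks for listening", "thank you for listening", "hope you enjoyed", "hope you had fun", "hope you learned", "that's all for today", "that's it for today", "see you next time", "until next time", "catch you next time", "don't forget to subscribe", "make sure to subscribe", "let's dive in", "let's get into it", "let's talk about", "i want to ask you", "i wanted to ask", "can i ask you"]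

def YOUTUBE_HOST_KEYWORDS : List String := ["hit the subscribe button", "subscribe to the channel", "subscribe to my channel", "don't forget to subscribe", "like and subscribe", "subscribe below", "click subscribe", "smash that subscribe", "hit the bell", "notification bell", "leave a like", "hit the like button", "check out the description", "link in the description", "support the channel", "support the show", "patreon"]

def SPONSOR_KEYWORDS : List String := ["sponsor", "brought to you by", "today's sponsor", "this episode is sponsored", "this podcast is brought", "promo code", "discount code", "coupon code", "percent off", "% off", "discount", "audible", "squarespace", "hellofresh", "betterhelp", "nordvpn", "athletic greens", "before we get started", "before we dive in", "quick word from our sponsor", "message from our sponsor"]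

def contains_keywords (text : String) (keywords : List String) : Bool :=
  let text_lower := PySem.Str.lower text
  keywords.any (fun keyword => PySem.Str.isIn (PySem.Str.lower keyword) text_lower)

def detect_host_segments (segments : List (List (String × String))) : List Int × String :=
  let st := (PySem.List.enumerate segments).foldl
    (fun (acc : List Int × List Int × List Int) p =>
      let text := (PySem.Dict.mk p.2).getD "text" ""
      if contains_keywords text HOST_PHRASES then (acc.1 ++ [p.1], acc.2.1, acc.2.2)
      else if contains_keywords text YOUTUBE_HOST_KEYWORDS then (acc.1, acc.2.1 ++ [p.1], acc.2.2)
      else if contains_keywords text SPONSOR_KEYWORDS then (acc.1, acc.2.1, acc.2.2 ++ [p.1])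
      else acc)
    ([], [], [])
  if st.1 ≠ [] then (st.1, "host_phrases")
  else if st.2.1 ≠ [] then (st.2.1, "youtube_cta")
  else if st.2.2 ≠ [] then (st.2.2, "sponsor")
  else ([], "none")

-- ===== PORT B =====
def PRIORITY_TABLE : List (List String × String) :=
  [(HOST_PHRASES, "host_phrases"), (YOUTUBE_HOST_KEYWORDS, "youtube_cta"), (SPONSOR_KEYWORDS, "sponsor")]

def altHits (segments : List (List (String × String))) (keywords : List String) : List Int :=
  ((PySem.List.enumerate segments).filter
    (fun p => contains_keywords ((PySem.Dict.mk p.2).getD "text" "") keywords)).map (·.1)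

def altScan (segments : List (List (String × String))) : List (List String × String) → List Int × String
  | [] => ([], "none")
  | (keywords, label) :: rest =>
      let hits := altHits segments keywords
      if hits ≠ [] then (hits, label) else altScan segments rest

def detect_host_segments_alt (segments : List (List (String × String))) : List Int × String :=
  altScan segments PRIORITY_TABLE

-- ===== PRECONDITION & SPEC =====
def Spec_detect_host_segments (segments : List (List (String × String))) (out : List Int × String) : Prop := out = detect_host_segments_alt segments
instance (segments : List (List (String × String))) (out : List Int × String) : Decidable (Spec_detect_host_segments segments out) := by unfold Spec_detect_host_segments; infer_instance

-- ===== CLAIM (what is proved, stated in full; the proofs are below) =====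
def Claim_equal_detect_host_segments : Prop := ∀ (segments : List (List (String × String))), Dom_detect_host_segments segments → Spec_detect_host_segments segments (detect_host_segments segments)

-- ===== LEMMAS AND PROOFS =====

/-- A's three-accumulator fold yields the three `elif`-style filters, appended to the accumulators. -/
theorem foldA_eq_filters (l : List (Int × List (String × String))) (h y s : List Int) :
    l.foldl
      (fun (acc : List Int × List Int × List Int) p =>
        let text := (PySem.Dict.mk p.2).getD "text" ""
        if contains_keywords text HOST_PHRASES then (acc.1 ++ [p.1], acc.2.1, acc.2.2)
        else if contains_keywords text YOUTUBE_HOST_KEYWORDS then (acc.1, acc.2.1 ++ [p.1], acc.2.2)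
        else if contains_keywords text SPONSOR_KEYWORDS then (acc.1, acc.2.1, acc.2.2 ++ [p.1])
        else acc)
      (h, y, s)
    = (h ++ (l.filter (fun p => contains_keywords ((PySem.Dict.mk p.2).getD "text" "") HOST_PHRASES)).map (·.1),
       y ++ (l.filter (fun p =>
         !contains_keywords ((PySem.Dict.mk p.2).getD "text" "") HOST_PHRASES &&
         contains_keywords ((PySem.Dict.mk p.2).getD "text" "") YOUTUBE_HOST_KEYWORDS)).map (·.1),
       s ++ (l.filter (fun p =>
         !contains_keywords ((PySem.Dict.mk p.2).getD "text" "") HOST_PHRASES &&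
         !contains_keywords ((PySem.Dict.mk p.2).getD "text" "") YOUTUBE_HOST_KEYWORDS &&
         contains_keywords ((PySem.Dict.mk p.2).getD "text" "") SPONSOR_KEYWORDS)).map (·.1)) := by
  induction l generalizing h y s with
  | nil => simp
  | cons p t ih =>
      simp only [List.foldl_cons, List.filter_cons]
      by_cases h1 : contains_keywords ((PySem.Dict.mk p.2).getD "text" "") HOST_PHRASES <;>
        by_cases h2 : contains_keywords ((PySem.Dict.mk p.2).getD "text" "") YOUTUBE_HOST_KEYWORDS <;>
        by_cases h3 : contains_keywords ((PySem.Dict.mk p.2).getD "text" "") SPONSOR_KEYWORDS <;>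
        simp [h1, h2, h3, ih]

-- ===== VERDICT (by name: the statement is the Claim_ definition above) =====
theorem detect_host_segments_spec : Claim_equal_detect_host_segments := by
  intro segments _
  show detect_host_segments segments = detect_host_segments_alt segments
  unfold detect_host_segments detect_host_segments_alt altScan PRIORITY_TABLE
  rw [foldA_eq_filters]
  set l := PySem.List.enumerate segments with hl
  simp only [List.nil_append]
  by_cases hH : l.filter (fun p => contains_keywords ((PySem.Dict.mk p.2).getD "text" "") HOST_PHRASES) = []
  case neg => simp [altScan, altHits, ← hl, List.map_eq_nil_iff, hH]
  have h1 : ∀ p ∈ l, contains_keywords ((PySem.Dict.mk p.2).getD "text" "") HOST_PHRASES = false := by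
    simpa [Bool.not_eq_true] using List.filter_eq_nil_iff.mp hH
  have e2 : l.filter (fun p =>
      !contains_keywords ((PySem.Dict.mk p.2).getD "text" "") HOST_PHRASES &&
      contains_keywords ((PySem.Dict.mk p.2).getD "text" "") YOUTUBE_HOST_KEYWORDS)
      = l.filter (fun p => contains_keywords ((PySem.Dict.mk p.2).getD "text" "") YOUTUBE_HOST_KEYWORDS) :=
    List.filter_congr (fun p hp => by simp [h1 p hp])
  by_cases hY : l.filter (fun p => contains_keywords ((PySem.Dict.mk p.2).getD "text" "") YOUTUBE_HOST_KEYWORDS) = []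
  case neg => simp [altScan, altHits, ← hl, List.map_eq_nil_iff, hH, e2, hY]
  have h2 : ∀ p ∈ l, contains_keywords ((PySem.Dict.mk p.2).getD "text" "") YOUTUBE_HOST_KEYWORDS = false := by
    simpa [Bool.not_eq_true] using List.filter_eq_nil_iff.mp hY
  have e3 : l.filter (fun p =>
      !contains_keywords ((PySem.Dict.mk p.2).getD "text" "") HOST_PHRASES &&
      !contains_keywords ((PySem.Dict.mk p.2).getD "text" "") YOUTUBE_HOST_KEYWORDS &&
      contains_keywords ((PySem.Dict.mk p.2).getD "text" "") SPONSOR_KEYWORDS)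
      = l.filter (fun p => contains_keywords ((PySem.Dict.mk p.2).getD "text" "") SPONSOR_KEYWORDS) :=
    List.filter_congr (fun p hp => by simp [h1 p hp, h2 p hp])
  by_cases hS : l.filter (fun p => contains_keywords ((PySem.Dict.mk p.2).getD "text" "") SPONSOR_KEYWORDS) = []
  · simp [altScan, altHits, ← hl, hH, e2, hY, e3, hS]
  · simp [altScan, altHits, ← hl, List.map_eq_nil_iff, hH, e2, hY, e3, hS]
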